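-- pv_equiv track=rewrite | github.com/n7tms/AOC | AOC2023/202309.py | prev_term
-- ===== SOURCE A (Python) =====
-- def prev_term(history: list) -> int:
--     if sum(history) == 0:
--         return 0
--     else:
--         cmp = [[x,y] for x,y in zip(history,history[1:])]
--         new_hist = [y-x for x,y in cmp]
--         out = prev_term(new_hist)
--         return new_hist[0] - out
-- ===== SOURCE B (Python) =====
-- def prev_term(history: list) -> int:
--     terms = []
--     cur = history
--     while sum(cur) != 0:
--         d = [y - x for x, y in zip(cur, cur[1:])]
--         terms.append(d[0])
--         cur = d
--     result = 0
--     for t in reversed(terms):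
--         result = t - result
--     return result
-- ===== Notes on version B (the rewrite author's own statement) =====
-- stated objective: faster
-- what changed: Replaces the recursive finite-difference descent with an explicit iterative loop that records each level's leading difference and folds the recorded terms back with alternating signs; it skips A's intermediate cmp pair-list and the recursion overhead.
import Mathlib
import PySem

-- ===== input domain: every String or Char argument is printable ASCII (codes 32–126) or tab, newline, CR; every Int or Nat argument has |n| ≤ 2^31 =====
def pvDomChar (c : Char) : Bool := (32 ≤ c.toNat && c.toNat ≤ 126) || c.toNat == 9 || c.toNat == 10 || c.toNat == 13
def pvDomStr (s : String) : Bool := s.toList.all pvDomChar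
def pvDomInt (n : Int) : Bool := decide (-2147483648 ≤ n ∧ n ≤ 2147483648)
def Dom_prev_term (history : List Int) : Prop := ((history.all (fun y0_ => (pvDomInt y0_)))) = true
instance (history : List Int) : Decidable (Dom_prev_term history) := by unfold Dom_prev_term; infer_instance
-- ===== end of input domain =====

-- ===== PORT A =====
-- Port of A: recursive finite-difference descent; history[1:] via slice, new_hist[0] via pyGet?
-- (Pre_ excludes the inputs where Python raises IndexError, so the .getD 0 default is never the value claimed about).
def prev_term (history : List Int) : Int :=
  if _h : history.sum = 0 then 0
  else
    let cmp := (history.zip (PySem.List.slice history (some 1) none)).map (fun p => (p.1, p.2))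
    let new_hist := cmp.map (fun p => p.2 - p.1)
    let out := prev_term new_hist
    (PySem.List.pyGet? new_hist 0).getD 0 - out
termination_by history.length
decreasing_by
  simp only [List.length_map, List.length_zip, PySem.List.slice_from_one, List.length_tail]
  cases history with
  | nil => simp at _h
  | cons a t => simp

-- ===== PORT B =====
-- Port of B: the while loop collecting each level's leading difference d[0] …
def altTerms (cur : List Int) : List Int :=
  if _h : cur.sum = 0 then []
  else
    let d := (cur.zip (PySem.List.slice cur (some 1) none)).map (fun p => p.2 - p.1)
    ((PySem.List.pyGet? d 0).getD 0) :: altTerms d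
termination_by cur.length
decreasing_by
  simp only [List.length_map, List.length_zip, PySem.List.slice_from_one, List.length_tail]
  cases cur with
  | nil => simp at _h
  | cons a t => simp

-- … then the reversed fold result = t - result.
def prev_term_alt (history : List Int) : Int :=
  (altTerms history).foldr (fun t result => t - result) 0

-- ===== PRECONDITION & SPEC =====
def pvDiffs (h : List Int) : List Int := (h.zip h.tail).map (fun p => p.2 - p.1)

-- Pre_ excludes exactly the inputs on which Python A raises IndexError (every row of the
-- finite-difference table, down to the final singleton, has nonzero sum); B raises there too.
def Pre_prev_term (history : List Int) : Prop :=
  history = [] ∨ ∃ k < history.length, (pvDiffs^[k] history).sum = 0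
instance (history : List Int) : Decidable (Pre_prev_term history) := by
  unfold Pre_prev_term; infer_instance

def pvWitness_prev_term : List Int := ([1, 2, 3])

def Spec_prev_term (history : List Int) (out : Int) : Prop := out = prev_term_alt history
instance (history : List Int) (out : Int) : Decidable (Spec_prev_term history out) := by unfold Spec_prev_term; infer_instance

-- ===== CLAIM (what is proved, stated in full; the proofs are below) =====
def Claim_equal_prev_term : Prop := ∀ (history : List Int), Dom_prev_term history → Pre_prev_term history → Spec_prev_term history (prev_term history)

-- ===== LEMMAS AND PROOFS =====
theorem prev_term_eq_alt (h : List Int) : prev_term h = prev_term_alt h := by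
  induction h using prev_term.induct with
  | case1 h hs => rw [prev_term, prev_term_alt, altTerms]; simp [hs]
  | case2 h hs cmp new_hist ih =>
    rw [prev_term, prev_term_alt, altTerms]
    simp only [hs, dite_false, List.foldr_cons]
    rw [← prev_term_alt]
    simp only [cmp, new_hist, List.map_map, Function.comp_def] at ih ⊢
    rw [ih]

-- ===== VERDICT (by name: the statement is the Claim_ definition above) =====
theorem prev_term_spec : Claim_equal_prev_term := by
  intro history _ _
  unfold Spec_prev_term
  exact prev_term_eq_alt history
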